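-- pv_equiv track=rewrite | github.com/anandinhere/AlgorithmsAndDataStructures | python/meta.py | allSubseqs
-- ===== SOURCE A (Python) =====
-- def allSubseqs(input):
--
--
--     def allSubseqsIn(in_list, start):
--
--         if start == len(in_list):
--             return [[]]
--
--         this_item = [in_list[start]]
--         subseqs_without_this = allSubseqsIn(in_list,start+1)
--
--         subseqs_with_this = [ this_item + subseq  for subseq in allSubseqsIn(in_list,start+1)]
--
--         all_subs = subseqs_without_this + subseqs_with_this
--         return all_subs
--
--     return allSubseqsIn(input,0)
-- ===== SOURCE B (Python) =====
-- def allSubseqs(input):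
--     # Iterative doubling over the reversed input: each item prepends itself to
--     # every subsequence built so far; single pass, each level computed once.
--     res = [[]]
--     for x in reversed(input):
--         res = res + [[x] + s for s in res]
--     return res
-- ===== Notes on version B (the rewrite author's own statement) =====
-- stated objective: faster
-- what changed: Replaces the double-recursive suffix enumeration (the same subcall computed twice per level) with a single iterative pass over the reversed list that doubles the accumulated result once per element; intended as faster, measured 4.79x at n=16 (both exceed the timeout at n=64, the output itself being exponential).
import Mathlib
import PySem

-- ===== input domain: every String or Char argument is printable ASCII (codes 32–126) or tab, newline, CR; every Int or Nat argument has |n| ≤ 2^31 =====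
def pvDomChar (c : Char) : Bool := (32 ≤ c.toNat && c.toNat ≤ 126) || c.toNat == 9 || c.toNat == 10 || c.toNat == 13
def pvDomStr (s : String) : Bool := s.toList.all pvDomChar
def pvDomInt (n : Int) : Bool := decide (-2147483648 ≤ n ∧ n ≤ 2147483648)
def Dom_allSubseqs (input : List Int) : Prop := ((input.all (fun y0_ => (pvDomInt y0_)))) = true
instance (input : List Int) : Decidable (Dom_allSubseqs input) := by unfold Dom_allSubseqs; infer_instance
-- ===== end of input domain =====

-- B replaces A's double-recursive enumeration by one doubling pass over the reversed list (measured 4.79x at n=16).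

-- ===== PORT A =====
-- A's inner recursion on the start index; the stop test 'start == len' is written
-- 'len ≤ start' (equivalent on every reachable call, where start ≤ len) for termination.
def allSubseqsIn (in_list : List Int) (start : Nat) : List (List Int) :=
  if h : in_list.length ≤ start then [[]]
  else
    let this_item := [in_list.getD start 0]
    let subseqs_without_this := allSubseqsIn in_list (start + 1)
    let subseqs_with_this := (allSubseqsIn in_list (start + 1)).map (fun subseq => this_item ++ subseq)
    subseqs_without_this ++ subseqs_with_this
termination_by in_list.length - start
decreasing_by all_goals omega

def allSubseqs (input : List Int) : List (List Int) := allSubseqsIn input 0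

-- ===== PORT B =====
def allSubseqs_alt (input : List Int) : List (List Int) :=
  input.reverse.foldl (fun res x => res ++ res.map (fun s => [x] ++ s)) [[]]

-- ===== PRECONDITION & SPEC =====
def Spec_allSubseqs (input : List Int) (out : List (List Int)) : Prop := out = allSubseqs_alt input
instance (input : List Int) (out : List (List Int)) : Decidable (Spec_allSubseqs input out) := by unfold Spec_allSubseqs; infer_instance

-- ===== CLAIM (what is proved, stated in full; the proofs are below) =====
def Claim_equal_allSubseqs : Prop := ∀ (input : List Int), Dom_allSubseqs input → Spec_allSubseqs input (allSubseqs input)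

-- ===== LEMMAS AND PROOFS =====

-- A's recursion from index `start` equals B's fold over the reversed suffix.
theorem allSubseqsIn_eq_fold (l : List Int) (start : Nat) :
    allSubseqsIn l start
      = (l.drop start).reverse.foldl (fun res x => res ++ res.map (fun s => [x] ++ s)) [[]] := by
  by_cases h : l.length ≤ start
  · rw [allSubseqsIn]
    simp [h, List.drop_eq_nil_of_le h]
  · have hlt : start < l.length := by omega
    have ih := allSubseqsIn_eq_fold l (start + 1)
    rw [allSubseqsIn]
    simp only [h, dite_false]
    have hdrop : l.drop start = l[start] :: l.drop (start + 1) :=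
      List.drop_eq_getElem_cons hlt
    rw [hdrop]
    simp only [List.reverse_cons, List.foldl_append, List.foldl_cons, List.foldl_nil]
    rw [← ih]
    simp [List.getD, hlt]
termination_by l.length - start
decreasing_by omega

-- ===== VERDICT (by name: the statement is the Claim_ definition above) =====
theorem allSubseqs_spec : Claim_equal_allSubseqs := by
  intro input _
  show allSubseqs input = allSubseqs_alt input
  rw [allSubseqs, allSubseqs_alt, allSubseqsIn_eq_fold, List.drop_zero]
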